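-- pv_equiv track=rewrite | github.com/healeycodes/hidden-in-apostrophes | apostophe-code.py | insert_morse
-- ===== SOURCE A (Python) =====
-- APOSTROPHE = '\''
--
-- RIGHT_MARK = '’'
--
-- morse = [".-", "-...", "-.-.", "-..", ".", "..-.", "--.", "....",
--          "..", ".---", "-.-", ".-..", "--", "-.", "---", ".--.",
--          "--.-", ".-.", "...", "-", "..-", "...-", ".--", "-..-",
--          "-.--", "--.."]
--
-- flatten = lambda l: [item for sublist in l for item in sublist]
--
-- def to_morse(message):
--     m = [morse[ord(c)-97] for c in message.lower()]
--     return flatten(m)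
--
-- def insert_morse(message, source):
--     # a list of dots and dashes
--     morse = to_morse(message)
--     # a list of the two types of apostrophes
--     secret = [APOSTROPHE if m == '.' else RIGHT_MARK for m in morse]
--     inserted = []
--     for c in source:
--         if len(secret) > 0 and (c == APOSTROPHE or c == RIGHT_MARK):
--             inserted.append(secret.pop(0))
--         else:
--             inserted.append(c)
--     return ''.join(inserted)
-- ===== SOURCE B (Python) =====
-- APOSTROPHE = '\''
--
-- RIGHT_MARK = '\u2019'
--
-- _MORSE = {chr(97 + i): code for i, code in enumerate([
--     ".-", "-...", "-.-.", "-..", ".", "..-.", "--.", "....",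
--     "..", ".---", "-.-", ".-..", "--", "-.", "---", ".--.",
--     "--.-", ".-.", "...", "-", "..-", "...-", ".--", "-..-",
--     "-.--", "--.."])}
--
-- def insert_morse(message, source):
--     code = ''.join(_MORSE[c] for c in message.lower())
--     chars = list(source)
--     positions = [i for i, c in enumerate(source)
--                  if c == APOSTROPHE or c == RIGHT_MARK]
--     for i, sym in zip(positions, code):
--         chars[i] = APOSTROPHE if sym == '.' else RIGHT_MARK
--     return ''.join(chars)
-- ===== Notes on version B (the rewrite author's own statement) =====
-- stated objective: alternative
-- what changed: A scans the source while destructively popping a precomputed queue of secret apostrophes; B instead precomputes the index list of apostrophe positions and scatters the morse-coded marks into the character list by position, joining once.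
-- outside the precondition, e.g. on insert_morse('`', "''"): A returns '’’', B raises KeyError; on insert_morse(' ', "''"): A raises IndexError, B raises KeyError
import Mathlib
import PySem

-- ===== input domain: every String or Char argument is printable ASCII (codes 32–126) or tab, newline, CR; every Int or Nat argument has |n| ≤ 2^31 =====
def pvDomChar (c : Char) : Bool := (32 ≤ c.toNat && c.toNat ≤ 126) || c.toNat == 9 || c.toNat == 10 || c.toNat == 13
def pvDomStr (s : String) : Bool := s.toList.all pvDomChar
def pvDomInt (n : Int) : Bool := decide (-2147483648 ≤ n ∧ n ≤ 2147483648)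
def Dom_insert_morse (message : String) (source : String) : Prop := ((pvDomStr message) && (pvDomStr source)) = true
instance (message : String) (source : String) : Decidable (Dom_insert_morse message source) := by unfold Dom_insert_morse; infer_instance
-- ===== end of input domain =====

-- B replaces A's scan-and-consume secret queue by a precomputed apostrophe-position
-- table and a position-driven scatter over the character list (objective: alternative decomposition).


-- ===== PORT A =====
def morseTableA : List String :=
  [".-", "-...", "-.-.", "-..", ".", "..-.", "--.", "....",
   "..", ".---", "-.-", ".-..", "--", "-.", "---", ".--.",
   "--.-", ".-.", "...", "-", "..-", "...-", ".--", "-..-",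
   "-.--", "--.."]

-- to_morse: [morse[ord(c)-97] for c in message.lower()], flattened to its characters.
-- pyGet? is exact Python indexing; getD "" is only reached where Python raises IndexError (outside Pre_).
def toMorseA (message : String) : List Char :=
  ((PySem.Str.lower message).toList.map
      (fun c => (PySem.List.pyGet? morseTableA ((c.toNat : Int) - 97)).getD "")).flatMap String.toList

-- A's loop: for c in source, pop the front of secret at apostrophe glyphs while secret is nonempty.
def loopA : List Char → List Char → List Char
  | [], _ => []
  | c :: cs, s0 :: srest =>
    if c = '\'' ∨ c = '’' then s0 :: loopA cs srest
    else c :: loopA cs (s0 :: srest)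
  | c :: cs, [] => c :: loopA cs []

def insert_morse (message : String) (source : String) : String :=
  let morse := toMorseA message
  let secret := morse.map (fun m => if m = '.' then '\'' else '’')
  String.ofList (loopA source.toList secret)

-- ===== PORT B =====
-- _MORSE = {chr(97+i): code for i, code in enumerate([...])}
def morseDictB : PySem.Dict Char String :=
  PySem.Dict.ofList ((PySem.List.enumerate morseTableA 0).map
      (fun p => (Char.ofNat (97 + p.1.toNat), p.2)))

-- B: code = joined morse string; positions = indices of apostrophe glyphs; scatter marks into chars.
-- getD "" is only reached where B's Python raises KeyError (outside Pre_).
def insert_morse_alt (message : String) (source : String) : String :=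
  let code : List Char := (PySem.Str.lower message).toList.flatMap
      (fun c => ((morseDictB.get? c).getD "").toList)
  let chars := source.toList
  let positions : List Nat := (PySem.List.enumerate source.toList 0).filterMap
      (fun p => if p.2 = '\'' ∨ p.2 = '’' then some p.1.toNat else none)
  String.ofList ((positions.zip code).foldl
      (fun l p => l.set p.1 (if p.2 = '.' then '\'' else '’')) chars)

-- ===== PRECONDITION & SPEC =====
-- Pre_ excludes messages containing any non-letter character: on most of them A raises
-- IndexError, and on those whose code points lie in 91–96 A returns a value only through
-- Python's negative-index wraparound, an artefact of its implementation; B's natural dict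
-- lookup raises KeyError on all of them.
def Pre_insert_morse (message : String) (source : String) : Prop :=
  (message.toList.all (fun c =>
    (97 ≤ c.toNat && c.toNat ≤ 122) || (65 ≤ c.toNat && c.toNat ≤ 90))) = true
instance (message : String) (source : String) : Decidable (Pre_insert_morse message source) := by
  unfold Pre_insert_morse; infer_instance

def pvWitness_insert_morse : String × String := ("sos", "it's a 'day' isn't it ''''''''")

def Spec_insert_morse (message : String) (source : String) (out : String) : Prop := out = insert_morse_alt message source
instance (message : String) (source : String) (out : String) : Decidable (Spec_insert_morse message source out) := by unfold Spec_insert_morse; infer_instance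

-- ===== CLAIM (what is proved, stated in full; the proofs are below) =====
def Claim_equal_insert_morse : Prop := ∀ (message : String) (source : String), Dom_insert_morse message source → Pre_insert_morse message source → Spec_insert_morse message source (insert_morse message source)

-- ===== LEMMAS AND PROOFS =====

theorem toNat_ofNat_valid (n : Nat) (h : n < 55296) : (Char.ofNat n).toNat = n := by
  unfold Char.ofNat
  rw [dif_pos (Or.inl h : Nat.isValidChar n)]
  simp [Char.ofNatAux, Char.toNat]

theorem char_le_iff (a b : Char) : a ≤ b ↔ a.toNat ≤ b.toNat := by
  rw [Char.le_def, UInt32.le_iff_toNat_le]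
  exact Iff.rfl

theorem isupper_iff (c : Char) : PySem.Chars.isupper c = true ↔ (65 ≤ c.toNat ∧ c.toNat ≤ 90) := by
  unfold PySem.Chars.isupper
  simp only [Bool.and_eq_true, decide_eq_true_eq, char_le_iff]
  have hA : ('A' : Char).toNat = 65 := rfl
  have hZ : ('Z' : Char).toNat = 90 := rfl
  rw [hA, hZ]

theorem lowerChar_bounds {c : Char}
    (h : (97 ≤ c.toNat ∧ c.toNat ≤ 122) ∨ (65 ≤ c.toNat ∧ c.toNat ≤ 90)) :
    97 ≤ (PySem.Chars.lowerChar c).toNat ∧ (PySem.Chars.lowerChar c).toNat ≤ 122 := by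
  unfold PySem.Chars.lowerChar
  by_cases hu : PySem.Chars.isupper c = true
  · have hb := (isupper_iff c).mp hu
    rw [if_pos hu, toNat_ofNat_valid _ (by omega)]
    omega
  · rw [if_neg hu]
    rcases h with h | h
    · omega
    · exact absurd ((isupper_iff c).mpr h) hu

-- the keys B's dict comprehension produces, computed once
theorem keysB : ((PySem.List.enumerate morseTableA 0).map
      (fun p => (Char.ofNat (97 + p.1.toNat), p.2))).map Prod.fst
    = ['a','b','c','d','e','f','g','h','i','j','k','l','m',
       'n','o','p','q','r','s','t','u','v','w','x','y','z'] := by decide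

theorem itemsB : morseDictB.items
    = (PySem.List.enumerate morseTableA 0).map
        (fun p => (Char.ofNat (97 + p.1.toNat), p.2)) := by
  unfold morseDictB
  have h := PySem.Dict.items_foldl_insert_fresh
      ((PySem.List.enumerate morseTableA 0).map
        (fun p => (Char.ofNat (97 + p.1.toNat), p.2)))
      Prod.fst Prod.snd PySem.Dict.empty
      (by intro a _; exact PySem.Dict.contains_empty _)
      (by rw [keysB]; decide)
  rw [show PySem.Dict.ofList ((PySem.List.enumerate morseTableA 0).map
      (fun p => (Char.ofNat (97 + p.1.toNat), p.2)))
    = ((PySem.List.enumerate morseTableA 0).map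
      (fun p => (Char.ofNat (97 + p.1.toNat), p.2))).foldl
        (fun d p => d.insert p.1 p.2) PySem.Dict.empty from rfl]
  rw [h]
  rw [show (PySem.Dict.empty : PySem.Dict Char String).items = [] from rfl, List.nil_append,
    List.map_map]
  exact List.map_congr_left (fun a _ => rfl)

theorem dict_getB (i : Nat) (hi : i < 26) :
    morseDictB.get? (Char.ofNat (97 + i)) = some (morseTableA[i]'(by simp [morseTableA]; omega)) := by
  refine PySem.Dict.get?_of_mem_items _ ?_ (PySem.Dict.nodup_keys_ofList _)
  · rw [itemsB]
    apply List.mem_map.mpr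
    refine ⟨((i : Int), morseTableA[i]'(by simp [morseTableA]; omega)), ?_, ?_⟩
    · exact (PySem.List.mem_enumerate_iff _ _ _).mpr ⟨i, by simp [morseTableA]; omega, by simp⟩
    · simp

-- per lowered letter, A's list lookup and B's dict lookup give the same code string
theorem perchar_eq {d : Char} (h1 : 97 ≤ d.toNat) (h2 : d.toNat ≤ 122) :
    (PySem.List.pyGet? morseTableA ((d.toNat : Int) - 97)).getD ""
      = (morseDictB.get? d).getD "" := by
  have hlen : morseTableA.length = 26 := rfl
  have hlt : ((d.toNat : Int) - 97) < (morseTableA.length : Int) := by rw [hlen]; omega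
  rw [PySem.List.pyGet?_eq_some_getElem morseTableA (by omega) hlt]
  have hd : d = Char.ofNat (97 + (d.toNat - 97)) := by
    rw [Nat.add_sub_cancel' h1, Char.ofNat_toNat]
  conv_rhs => rw [hd]
  rw [dict_getB (d.toNat - 97) (by omega)]
  simp only [Option.getD_some]
  have hidx : ((d.toNat : Int) - 97).toNat = d.toNat - 97 := by omega
  simp [hidx]

theorem loopA_nil (cs : List Char) : loopA cs [] = cs := by
  induction cs with
  | nil => rfl
  | cons c cs ih => simp [loopA, ih]

theorem enumerate_shift {α : Type} (xs : List α) (s : Int) :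
    PySem.List.enumerate xs (s + 1) = (PySem.List.enumerate xs s).map (fun p => (p.1 + 1, p.2)) := by
  induction xs generalizing s with
  | nil => simp [PySem.List.enumerate_nil]
  | cons x xs ih =>
      rw [PySem.List.enumerate_cons, PySem.List.enumerate_cons, List.map_cons, ih (s + 1)]

def positionsOf (cs : List Char) : List Nat :=
  (PySem.List.enumerate cs 0).filterMap
    (fun p => if p.2 = '\'' ∨ p.2 = '’' then some p.1.toNat else none)

theorem positions_cons (c : Char) (cs : List Char) :
    positionsOf (c :: cs)
      = (if c = '\'' ∨ c = '’' then [0] else []) ++ (positionsOf cs).map (· + 1) := by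
  unfold positionsOf
  rw [PySem.List.enumerate_cons, List.filterMap_cons]
  have h1 : PySem.List.enumerate cs (0 + 1) = (PySem.List.enumerate cs 0).map (fun p => (p.1 + 1, p.2)) :=
    enumerate_shift cs 0
  have h2 : ((PySem.List.enumerate cs 0).map (fun p => (p.1 + 1, p.2))).filterMap
        (fun p => if p.2 = '\'' ∨ p.2 = '’' then some p.1.toNat else none)
      = ((PySem.List.enumerate cs 0).filterMap
        (fun p => if p.2 = '\'' ∨ p.2 = '’' then some p.1.toNat else none)).map (· + 1) := by
    rw [List.filterMap_map, List.map_filterMap]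
    apply List.filterMap_congr
    intro p hp
    have hnn : 0 ≤ p.1 := by
      rcases (PySem.List.mem_enumerate_iff _ _ _).mp hp with ⟨k, hk, rfl⟩
      simp
    by_cases h : p.2 = '\'' ∨ p.2 = '’'
    · simp only [Function.comp_apply, h, if_true, Option.map_some]
      congr 1
      omega
    · simp [Function.comp, h]
  norm_num at h1 ⊢
  rw [h1, h2]
  by_cases h : c = '\'' ∨ c = '’' <;> simp [h]

theorem foldl_set_shift (ps : List (Nat × Char)) (a : Char) (l : List Char) :
    (ps.map (fun p => (p.1 + 1, p.2))).foldl
        (fun l p => l.set p.1 (if p.2 = '.' then '\'' else '’')) (a :: l)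
      = a :: ps.foldl (fun l p => l.set p.1 (if p.2 = '.' then '\'' else '’')) l := by
  induction ps generalizing l with
  | nil => rfl
  | cons p ps ih => simp [List.foldl_cons, List.set_cons_succ, ih]

-- the heart: A's consume-a-queue loop equals B's position scatter
theorem scatter_eq (cs : List Char) (code : List Char) :
    loopA cs (code.map (fun m => if m = '.' then '\'' else '’'))
      = ((positionsOf cs).zip code).foldl
          (fun l p => l.set p.1 (if p.2 = '.' then '\'' else '’')) cs := by
  induction cs generalizing code with
  | nil => cases code <;> rfl
  | cons c cs ih =>
      rw [positions_cons]
      by_cases hc : c = '\'' ∨ c = '’'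
      · cases code with
        | nil => simp [hc, loopA_nil]
        | cons y ys =>
            simp only [List.map_cons, loopA, hc, if_true, List.cons_append,
              List.nil_append, List.zip_cons_cons, List.foldl_cons]
            have hz : ((positionsOf cs).map (· + 1)).zip ys
                = ((positionsOf cs).zip ys).map (fun p => (p.1 + 1, p.2)) := by
              rw [List.zip_map_left]; rfl
            simp [hz, List.set_cons_zero, foldl_set_shift, ih]
      · have hz : ((positionsOf cs).map (· + 1)).zip code
            = ((positionsOf cs).zip code).map (fun p => (p.1 + 1, p.2)) := by
          rw [List.zip_map_left]; rfl
        cases code with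
        | nil => simp [hc, loopA_nil]
        | cons y ys =>
            simp only [List.map_cons, loopA, hc, if_false, List.nil_append, hz,
              foldl_set_shift]
            simpa using ih (y :: ys)

-- on letter-only messages the two code lists coincide
theorem code_eq (message : String) (hm : Pre_insert_morse message "") :
    toMorseA message
      = (PySem.Str.lower message).toList.flatMap (fun c => ((morseDictB.get? c).getD "").toList) := by
  unfold toMorseA
  rw [List.flatMap_map]
  have hl : (PySem.Str.lower message).toList = message.toList.map PySem.Chars.lowerChar := by
    simp [PySem.Chars.lower]
  rw [hl]
  apply List.flatMap_congr
  intro d hd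
  rcases List.mem_map.mp hd with ⟨c, hc, rfl⟩
  have hb := List.all_eq_true.mp hm c hc
  simp only [Bool.or_eq_true, Bool.and_eq_true, decide_eq_true_eq] at hb
  have hlo := lowerChar_bounds hb
  exact congrArg String.toList (perchar_eq hlo.1 hlo.2)

-- ===== VERDICT (by name: the statement is the Claim_ definition above) =====
theorem insert_morse_spec : Claim_equal_insert_morse := by
  intro message source _ hpre
  unfold Spec_insert_morse insert_morse insert_morse_alt
  rw [← code_eq message hpre]
  exact congrArg String.ofList (scatter_eq source.toList (toMorseA message))
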